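-- pv_equiv track=rewrite | github.com/SorenKF/cueties | secondary_content_baseline_viv.py | split_spans_on_cue
-- ===== SOURCE A (Python) =====
-- def split_spans_on_cue(content_dictionary, cue_dictionary):
--     """
--     Split the content spans that were defined previously in content_dictionary on the cues found in cue_dictionary
--         to get a list of indices that appear before the cue and after the cue. This is valuable for later checking
--         which of these two list is longest.
--
--     :param content_dictionary: nested dictionary with a tuple of (filename, sentence_num) as key and a list of content
--         indices as value.
--     :param cue_dictionary: nested dictionary with a tuple of (filename, sentence_num) as key and a list of cue
--         indices as value.
--     :return: main_dictionary (a nested dictionary with tuples of (filename, sentence_num) as key and "before" and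
--         "after" as nested keys that both contain a list of indices.
--     """
--     main_dictionary = dict()
--
--     # Loop over content_dictionary and cue_dictionary to get the tuples and lists of indices.
--     for content_tuple, content_indices in content_dictionary.items():
--         for cue_tuple, cue_index in cue_dictionary.items():
--             # Check if the tuples are the same for content and cue and if they are define a before and after list,
--             # a main_dictionary with the tuple as the key and define cue_encountered as 0.
--             if content_tuple == cue_tuple:
--                 main_dictionary[content_tuple] = dict()
--                 before = list()
--                 after = list()
--                 cue_encountered = 0
--
--                 for index in content_indices:
--                     # If the index is a cue, set cue_encounterd to 1.
--                     if index in cue_index: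
--                         cue_encountered = 1
--                         continue
--                     # If no cue is encountered yet, add the index to the 'before' list.
--                     if cue_encountered == 0:
--                         before.append(index)
--                     # If a cue has been encountered previously, add the index to the 'after' list instead.
--                     elif cue_encountered == 1:
--                         after.append(index)
--
--                 # Add both the 'before' and 'after' indices list to their respective (filename, sentence_num) tuple
--                 # in the main dictionary.
--                 main_dictionary[content_tuple]["before"] = before
--                 main_dictionary[content_tuple]["after"] = after
--
--     return main_dictionary
-- ===== SOURCE B (Python) =====
-- def split_spans_on_cue(content_dictionary, cue_dictionary):
--     main_dictionary = {}
--     for key, content_indices in content_dictionary.items():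
--         cues = cue_dictionary.get(key)
--         if cues is None:
--             continue
--         cue_set = set(cues)
--         pos = next((i for i, x in enumerate(content_indices) if x in cue_set),
--                    len(content_indices))
--         main_dictionary[key] = {
--             "before": content_indices[:pos],
--             "after": [x for x in content_indices[pos + 1:] if x not in cue_set],
--         }
--     return main_dictionary
-- ===== Notes on version B (the rewrite author's own statement) =====
-- stated objective: faster
-- what changed: Replaces A's nested scan over all cue keys and its cue_encountered flag loop by a direct dict lookup per content key plus a 'find first cue position, then slice before / filter after' decomposition with set membership.
import Mathlib
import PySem

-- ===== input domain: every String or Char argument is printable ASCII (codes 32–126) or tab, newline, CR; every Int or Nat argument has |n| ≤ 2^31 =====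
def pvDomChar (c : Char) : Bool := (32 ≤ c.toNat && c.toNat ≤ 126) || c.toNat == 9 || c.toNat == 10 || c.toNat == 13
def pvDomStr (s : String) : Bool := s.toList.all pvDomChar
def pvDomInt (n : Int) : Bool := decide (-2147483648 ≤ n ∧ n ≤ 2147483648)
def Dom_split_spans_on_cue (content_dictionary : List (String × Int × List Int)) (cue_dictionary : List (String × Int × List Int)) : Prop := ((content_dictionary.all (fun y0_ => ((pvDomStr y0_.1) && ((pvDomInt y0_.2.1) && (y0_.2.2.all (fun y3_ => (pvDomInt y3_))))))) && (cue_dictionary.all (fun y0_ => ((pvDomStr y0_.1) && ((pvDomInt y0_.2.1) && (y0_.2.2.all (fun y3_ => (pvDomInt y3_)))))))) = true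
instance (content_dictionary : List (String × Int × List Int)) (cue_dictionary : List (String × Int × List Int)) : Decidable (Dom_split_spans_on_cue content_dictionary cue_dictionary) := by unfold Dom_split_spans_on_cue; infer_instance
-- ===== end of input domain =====

-- B replaces A's nested scan over all cue keys and its cue_encountered-flag loop by one dict
-- lookup per content key and a "first cue position, then slice/filter" decomposition (faster).

-- ===== PORT A =====
-- the body of A's innermost 'for index in content_indices' loop (state: before, after, cue_encountered)
def pvInnerStep (cue_index : List Int) (s : List Int × List Int × Int) (index : Int) :
    List Int × List Int × Int :=
  if cue_index.contains index then (s.1, s.2.1, 1)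
  else if s.2.2 = 0 then (s.1 ++ [index], s.2.1, s.2.2)
  else if s.2.2 = 1 then (s.1, s.2.1 ++ [index], s.2.2)
  else s

-- the value A stores for a matching key: {} then ["before"] and ["after"] assigned
def pvAVal (ct cu : String × Int × List Int) : PySem.Dict String (List Int) :=
  let r := ct.2.2.foldl (pvInnerStep cu.2.2) ([], [], 0)
  (PySem.Dict.empty.insert "before" r.1).insert "after" r.2.1

-- the body of A's 'for cue_tuple, cue_index in cue_dictionary.items()' loop
def pvCueStep (ct : String × Int × List Int)
    (main : PySem.Dict (String × Int) (PySem.Dict String (List Int)))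
    (cu : String × Int × List Int) : PySem.Dict (String × Int) (PySem.Dict String (List Int)) :=
  if (ct.1, ct.2.1) = (cu.1, cu.2.1) then main.insert (ct.1, ct.2.1) (pvAVal ct cu) else main

def split_spans_on_cue (content_dictionary : List (String × Int × List Int)) (cue_dictionary : List (String × Int × List Int)) : List (String × Int × List (String × List Int)) :=
  (content_dictionary.foldl
    (fun main ct => cue_dictionary.foldl (pvCueStep ct) main) PySem.Dict.empty).items.map
    (fun kv => (kv.1.1, kv.1.2, kv.2.items))

-- ===== PORT B =====
-- one content entry of B: lookup the key among the cues, split at the first cue position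
def pvSplitEntry (cue_dictionary : List (String × Int × List Int))
    (ct : String × Int × List Int) : Option (String × Int × List (String × List Int)) :=
  match cue_dictionary.find? (fun cu => cu.1 == ct.1 && cu.2.1 == ct.2.1) with
  | none => none
  | some cu =>
      let cueSet : PySem.Set Int := PySem.Set.ofList cu.2.2
      let ci := ct.2.2
      let pos := ci.findIdx (fun x => PySem.Set.contains cueSet x)
      some (ct.1, ct.2.1,
        [("before", ci.take pos),
         ("after", (ci.drop (pos + 1)).filter (fun x => !PySem.Set.contains cueSet x))])

def split_spans_on_cue_alt (content_dictionary : List (String × Int × List Int)) (cue_dictionary : List (String × Int × List Int)) : List (String × Int × List (String × List Int)) :=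
  content_dictionary.filterMap (pvSplitEntry cue_dictionary)

-- ===== PRECONDITION & SPEC =====
-- Pre_ excludes association lists carrying a duplicate (filename, sentence_num) key: such lists do
-- not represent a Python dict input (dicts have unique keys), and A's overwrite-in-place behaviour
-- on them is accidental.
def Pre_split_spans_on_cue (content_dictionary : List (String × Int × List Int)) (cue_dictionary : List (String × Int × List Int)) : Prop :=
  (content_dictionary.map (fun e => (e.1, e.2.1))).Nodup ∧
  (cue_dictionary.map (fun e => (e.1, e.2.1))).Nodup
instance (content_dictionary : List (String × Int × List Int)) (cue_dictionary : List (String × Int × List Int)) : Decidable (Pre_split_spans_on_cue content_dictionary cue_dictionary) := by unfold Pre_split_spans_on_cue; infer_instance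

def pvWitness_split_spans_on_cue : (List (String × Int × List Int)) × (List (String × Int × List Int)) :=
  ([("a", 0, [1, 2, 3]), ("b", 1, [4, 5])], [("a", 0, [2, 9])])

def Spec_split_spans_on_cue (content_dictionary : List (String × Int × List Int)) (cue_dictionary : List (String × Int × List Int)) (out : List (String × Int × List (String × List Int))) : Prop := out = split_spans_on_cue_alt content_dictionary cue_dictionary
instance (content_dictionary : List (String × Int × List Int)) (cue_dictionary : List (String × Int × List Int)) (out : List (String × Int × List (String × List Int))) : Decidable (Spec_split_spans_on_cue content_dictionary cue_dictionary out) := by unfold Spec_split_spans_on_cue; infer_instance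

-- ===== CLAIM (what is proved, stated in full; the proofs are below) =====
def Claim_equal_split_spans_on_cue : Prop := ∀ (content_dictionary : List (String × Int × List Int)) (cue_dictionary : List (String × Int × List Int)), Dom_split_spans_on_cue content_dictionary cue_dictionary → Pre_split_spans_on_cue content_dictionary cue_dictionary → Spec_split_spans_on_cue content_dictionary cue_dictionary (split_spans_on_cue content_dictionary cue_dictionary)

-- ===== LEMMAS AND PROOFS =====

-- the key of an entry
def pvKey (e : String × Int × List Int) : String × Int := (e.1, e.2.1)

-- once the flag is 1, every non-cue index goes to 'after'
lemma pvInner_one (cs : List Int) (idxs : List Int) : ∀ b a : List Int,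
    idxs.foldl (pvInnerStep cs) (b, a, 1) =
      (b, a ++ idxs.filter (fun x => !cs.contains x), 1) := by
  induction idxs with
  | nil => intro b a; simp
  | cons x t ih =>
      intro b a
      by_cases hx : x ∈ cs
      · simp [pvInnerStep, hx, ih]
      · simp [pvInnerStep, hx, ih]

-- from flag 0: 'before' collects up to the first cue, 'after' the non-cues past it
lemma pvInner_zero (cs : List Int) (idxs : List Int) : ∀ b a : List Int,
    idxs.foldl (pvInnerStep cs) (b, a, 0) =
      (b ++ idxs.take (idxs.findIdx (fun x => cs.contains x)),
       a ++ (idxs.drop (idxs.findIdx (fun x => cs.contains x) + 1)).filter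
              (fun x => !cs.contains x),
       if idxs.any (fun x => cs.contains x) then 1 else 0) := by
  induction idxs with
  | nil => intro b a; simp
  | cons x t ih =>
      intro b a
      by_cases hx : x ∈ cs
      · simp [pvInnerStep, hx, List.findIdx_cons, pvInner_one]
      · simp [pvInnerStep, hx, List.findIdx_cons, ih]

-- A's stored dict for a matching key, as the two-entry association list B emits
lemma pvAVal_items (ct cu : String × Int × List Int) :
    (pvAVal ct cu).items =
      [("before", ct.2.2.take (ct.2.2.findIdx (fun x => cu.2.2.contains x))),
       ("after", (ct.2.2.drop (ct.2.2.findIdx (fun x => cu.2.2.contains x) + 1)).filter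
          (fun x => !cu.2.2.contains x))] := by
  unfold pvAVal
  rw [pvInner_zero cu.2.2 ct.2.2 [] []]
  rfl

-- a cue loop that meets no matching key leaves the dictionary untouched
lemma pvCue_no_match (ct : String × Int × List Int) :
    ∀ (cue : List (String × Int × List Int)) main,
    (∀ cu ∈ cue, pvKey cu ≠ pvKey ct) →
    cue.foldl (pvCueStep ct) main = main := by
  intro cue
  induction cue with
  | nil => intro main _; rfl
  | cons cu rest ih =>
      intro main h
      have h1 : pvKey cu ≠ pvKey ct := h cu (by simp)
      have hs : pvCueStep ct main cu = main := by
        unfold pvCueStep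
        exact if_neg (fun he => h1 he.symm)
      simpa [List.foldl_cons, hs] using ih main (fun c hc => h c (by simp [hc]))

-- the whole cue loop for one content entry: the first (only) matching key wins
lemma pvCue_fold (ct : String × Int × List Int) :
    ∀ (cue : List (String × Int × List Int)) main,
    (cue.map pvKey).Nodup →
    cue.foldl (pvCueStep ct) main =
      match cue.find? (fun cu => cu.1 == ct.1 && cu.2.1 == ct.2.1) with
      | none => main
      | some cu => main.insert (pvKey ct) (pvAVal ct cu) := by
  intro cue
  induction cue with
  | nil => intro main _; rfl
  | cons cu rest ih =>
      intro main h
      by_cases hm : pvKey cu = pvKey ct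
      · have hp : (cu.1 == ct.1 && cu.2.1 == ct.2.1) = true := by
          have hm' := hm
          simp only [pvKey, Prod.mk.injEq] at hm'
          simp [hm'.1, hm'.2]
        have hstep : pvCueStep ct main cu = main.insert (pvKey ct) (pvAVal ct cu) := by
          unfold pvCueStep
          rw [if_pos]
          · rfl
          · exact hm.symm
        have hnone : ∀ c ∈ rest, pvKey c ≠ pvKey ct := by
          intro c hc he
          have : pvKey cu ∈ rest.map pvKey := by
            rw [hm, ← he]; exact List.mem_map_of_mem hc
          exact (List.nodup_cons.mp h).1 this
        have hfind : List.find? (fun cu : String × Int × List Int => cu.1 == ct.1 && cu.2.1 == ct.2.1) (cu :: rest) = some cu :=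
          List.find?_cons_of_pos hp
        rw [List.foldl_cons, hstep, pvCue_no_match ct rest _ hnone, hfind]
      · have hp : (cu.1 == ct.1 && cu.2.1 == ct.2.1) = false := by
          by_contra hb
          have : cu.1 = ct.1 ∧ cu.2.1 = ct.2.1 := by
            have := eq_true_of_ne_false hb
            simpa using this
          exact hm (Prod.ext this.1 this.2)
        have hstep : pvCueStep ct main cu = main := by
          unfold pvCueStep
          exact if_neg (fun he => hm he.symm)
        have hfind : List.find? (fun cu : String × Int × List Int => cu.1 == ct.1 && cu.2.1 == ct.2.1) (cu :: rest) =
            List.find? (fun cu : String × Int × List Int => cu.1 == ct.1 && cu.2.1 == ct.2.1) rest :=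
          List.find?_cons_of_neg (by simp [hp])
        rw [List.foldl_cons, hstep, hfind, ih main (List.nodup_cons.mp h).2]

-- the outer content loop: fresh distinct keys append in content order
lemma pvOuter (cue : List (String × Int × List Int)) (hcue : (cue.map pvKey).Nodup) :
    ∀ (content : List (String × Int × List Int))
      (main : PySem.Dict (String × Int) (PySem.Dict String (List Int))),
    (content.map pvKey).Nodup →
    (∀ ct ∈ content, main.contains (pvKey ct) = false) →
    (content.foldl (fun m ct => cue.foldl (pvCueStep ct) m) main).items =
      main.items ++ content.filterMap (fun ct =>
        (cue.find? (fun cu => cu.1 == ct.1 && cu.2.1 == ct.2.1)).map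
          (fun cu => (pvKey ct, pvAVal ct cu))) := by
  intro content
  induction content with
  | nil => intro main _ _; simp
  | cons ct rest ih =>
      intro main hnd hfresh
      rw [List.foldl_cons, pvCue_fold ct cue main hcue]
      rcases hfind : cue.find? (fun cu => cu.1 == ct.1 && cu.2.1 == ct.2.1) with _ | cu
      · simp only [hfind]
        rw [ih main (List.nodup_cons.mp hnd).2
          (fun c hc => hfresh c (by simp [hc]))]
        simp [hfind]
      · simp only [hfind]
        have hctfresh : main.contains (pvKey ct) = false := hfresh ct (by simp)
        have hitems : (main.insert (pvKey ct) (pvAVal ct cu)).items =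
            main.items ++ [(pvKey ct, pvAVal ct cu)] :=
          PySem.Dict.items_insert_of_not_contains main (pvAVal ct cu) hctfresh
        rw [ih (main.insert (pvKey ct) (pvAVal ct cu)) (List.nodup_cons.mp hnd).2 ?_,
          hitems]
        · simp [hfind]
        · intro c hc
          rw [PySem.Dict.contains_insert]
          have hne : pvKey c ≠ pvKey ct := by
            intro he
            exact (List.nodup_cons.mp hnd).1 (he ▸ List.mem_map_of_mem hc)
          simp [hne, hfresh c (by simp [hc])]

-- per entry, A's (key, value) pair flattens to B's output entry
lemma pvEntry_eq (cue : List (String × Int × List Int)) (ct : String × Int × List Int) :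
    ((cue.find? (fun cu => cu.1 == ct.1 && cu.2.1 == ct.2.1)).map
        (fun cu => (pvKey ct, pvAVal ct cu))).map
      (fun kv => (kv.1.1, kv.1.2, kv.2.items)) = pvSplitEntry cue ct := by
  unfold pvSplitEntry
  rcases hfind : cue.find? (fun cu => cu.1 == ct.1 && cu.2.1 == ct.2.1) with _ | cu
  · simp only [hfind, Option.map_none]
  · simp only [hfind, Option.map_some]
    simp [pvAVal_items, pvKey]

-- ===== VERDICT (by name: the statement is the Claim_ definition above) =====
theorem split_spans_on_cue_spec : Claim_equal_split_spans_on_cue := by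
  intro content cue _hdom hpre
  unfold Spec_split_spans_on_cue split_spans_on_cue split_spans_on_cue_alt
  rw [pvOuter cue hpre.2 content PySem.Dict.empty hpre.1
    (fun ct _ => by simp [PySem.Dict.contains_empty])]
  have hemp : (PySem.Dict.empty : PySem.Dict (String × Int) (PySem.Dict String (List Int))).items = [] := rfl
  rw [hemp, List.nil_append, List.map_filterMap]
  exact List.filterMap_congr (fun ct _ => pvEntry_eq cue ct)
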